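-- pv_equiv track=rewrite | github.com/music-computing/amads | amads/core/vector_transforms_checks.py | indices_to_indicator
-- ===== SOURCE A (Python) =====
-- from typing import Optional, Sequence, Union
--
-- def indices_to_indicator(
--     indices_vector: Union[list[int], tuple[int, ...]],
--     indicator_length: Optional[int] = None,
-- ) -> tuple:
--     """
--     Simple mapping from indices to indicator vector.
--
--     Parameters
--     ----------
--     indices_vector: Union[list[int], tuple[int, ...]]
--         A vector of indices (0, 2, 4, 5, 7, 9, 11).
--         Monotonic increase is expected but not required.
--     indicator_length: Optional[int]
--         optionally specify the length of the output indicator vector.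
--         If not specified, we use the highest index in the indices vector.
--
--     Examples
--     --------
--     Round trip
--     >>> bembé = (1, 0, 1, 0, 1, 1, 0, 1, 0, 1, 0, 1)
--     >>> indices = indicator_to_indices(bembé)
--     >>> indices
--     (0, 2, 4, 5, 7, 9, 11)
--
--     No `indicator_length` is needed for default
--
--     >>> round_trip = indices_to_indicator(indices)
--     >>> round_trip
--     (1, 0, 1, 0, 1, 1, 0, 1, 0, 1, 0, 1)
--
--     >>> round_trip == bembé
--     True
--
--     The `indicator_length` can, however, be specified:
--     >>> indices_to_indicator(indices, indicator_length=12)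
--     (1, 0, 1, 0, 1, 1, 0, 1, 0, 1, 0, 1)
--
--     And the `indicator_length` can extend the indicator as needed:
--     >>> indices_to_indicator(indices, indicator_length=14)
--     (1, 0, 1, 0, 1, 1, 0, 1, 0, 1, 0, 1, 0, 0)
--
--     """
--     if indicator_length is None:
--         indicator_length = max(indices_vector) + 1
--     index_set = set(indices_vector)
--     return tuple(1 if i in index_set else 0 for i in range(indicator_length))
-- ===== SOURCE B (Python) =====
-- def indices_to_indicator(indices_vector, indicator_length=None):
--     if indicator_length is None:
--         indicator_length = max(indices_vector) + 1
--     hits = sorted(set(i for i in indices_vector if 0 <= i < indicator_length))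
--     out = []
--     pos = 0
--     for h in hits:
--         out.extend([0] * (h - pos))
--         out.append(1)
--         pos = h + 1
--     out.extend([0] * (indicator_length - pos))
--     return tuple(out)
-- ===== Notes on version B (the rewrite author's own statement) =====
-- stated objective: alternative
-- what changed: B sorts the distinct in-range indices and emits the output as runs of zeros with a one at each sorted hit (run-length construction), instead of A's per-position membership test against a set over range(indicator_length).
import Mathlib
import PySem

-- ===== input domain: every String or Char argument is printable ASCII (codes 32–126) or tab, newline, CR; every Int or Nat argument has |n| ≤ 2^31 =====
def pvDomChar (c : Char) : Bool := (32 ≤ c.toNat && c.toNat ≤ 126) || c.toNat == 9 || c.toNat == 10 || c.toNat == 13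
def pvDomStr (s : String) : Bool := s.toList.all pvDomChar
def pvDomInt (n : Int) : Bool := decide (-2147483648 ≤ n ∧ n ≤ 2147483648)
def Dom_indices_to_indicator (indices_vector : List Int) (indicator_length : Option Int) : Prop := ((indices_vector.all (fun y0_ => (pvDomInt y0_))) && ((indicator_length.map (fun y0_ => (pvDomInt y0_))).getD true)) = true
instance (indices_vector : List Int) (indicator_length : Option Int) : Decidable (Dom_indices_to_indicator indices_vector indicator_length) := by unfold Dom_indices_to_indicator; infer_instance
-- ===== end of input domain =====

-- B sorts the distinct in-range indices and emits the output as runs of zeros with a one at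
-- each sorted hit, instead of A's per-position set-membership test over range(indicator_length).

-- ===== PORT A =====
-- A: if None, indicator_length = max(indices)+1 (max([]) raises ValueError, excluded by Pre_);
-- then build set(indices_vector) and test membership for each i in range(indicator_length).
def indices_to_indicator (indices_vector : List Int) (indicator_length : Option Int) : List Int :=
  match indicator_length with
  | none =>
    match PySem.List.max? indices_vector (fun x => x) with
    | none => []
    | some m =>
      let index_set : PySem.Set Int := PySem.Set.ofList indices_vector
      (PySem.List.pyRange 0 (m + 1) 1).map (fun i => if PySem.Set.contains index_set i then 1 else 0)
  | some L =>
      let index_set : PySem.Set Int := PySem.Set.ofList indices_vector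
      (PySem.List.pyRange 0 L 1).map (fun i => if PySem.Set.contains index_set i then 1 else 0)

-- ===== PORT B =====
-- run-length emitter: for each sorted hit h, append (h - pos) zeros and a one; finally pad to L
def pvEmit : List Int → Int → Int → List Int
  | [], pos, L => List.replicate (L - pos).toNat 0
  | h :: t, pos, L => List.replicate (h - pos).toNat 0 ++ [1] ++ pvEmit t (h + 1) L

def indices_to_indicator_alt (indices_vector : List Int) (indicator_length : Option Int) : List Int :=
  let len? : Option Int :=
    match indicator_length with
    | some L => some L
    | none => (PySem.List.max? indices_vector (fun x => x)).map (· + 1)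
  match len? with
  | none => []
  | some L =>
    let hits := PySem.List.sorted
      (PySem.Set.ofList (indices_vector.filter (fun i => decide (0 ≤ i ∧ i < L)))) (fun x => x) false
    pvEmit hits 0 L

-- ===== PRECONDITION & SPEC =====
-- Pre_ excludes only indicator_length = None with an empty indices_vector, where both
-- Pythons raise ValueError from max([]).
def Pre_indices_to_indicator (indices_vector : List Int) (indicator_length : Option Int) : Prop :=
  indicator_length = none → indices_vector ≠ []
instance (indices_vector : List Int) (indicator_length : Option Int) : Decidable (Pre_indices_to_indicator indices_vector indicator_length) := by unfold Pre_indices_to_indicator; infer_instance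
def pvWitness_indices_to_indicator : List Int × Option Int := ([0, 2, 4, 5, 7, 9, 11], none)

def Spec_indices_to_indicator (indices_vector : List Int) (indicator_length : Option Int) (out : List Int) : Prop := out = indices_to_indicator_alt indices_vector indicator_length
instance (indices_vector : List Int) (indicator_length : Option Int) (out : List Int) : Decidable (Spec_indices_to_indicator indices_vector indicator_length out) := by unfold Spec_indices_to_indicator; infer_instance

-- ===== CLAIM (what is proved, stated in full; the proofs are below) =====
def Claim_equal_indices_to_indicator : Prop := ∀ (indices_vector : List Int) (indicator_length : Option Int), Dom_indices_to_indicator indices_vector indicator_length → Pre_indices_to_indicator indices_vector indicator_length → Spec_indices_to_indicator indices_vector indicator_length (indices_to_indicator indices_vector indicator_length)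

-- ===== LEMMAS AND PROOFS =====

theorem pvMap_zero_replicate (l : List Int) :
    l.map (fun _ => (0 : Int)) = List.replicate l.length 0 := by
  induction l with
  | nil => rfl
  | cons x t ih => simp [ih, List.replicate_succ]

-- the emitter equals the per-position indicator over [pos, L), for sorted in-range hits
theorem pvEmit_eq_map (hits : List Int) (pos L : Int)
    (hs : hits.Pairwise (· < ·)) (hb : ∀ h ∈ hits, pos ≤ h ∧ h < L) :
    pvEmit hits pos L
      = (PySem.List.pyRange pos L 1).map (fun i => if i ∈ hits then 1 else 0) := by
  induction hits generalizing pos with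
  | nil =>
    simp only [pvEmit, List.not_mem_nil, if_false]
    rw [pvMap_zero_replicate, PySem.List.length_pyRange_one]
  | cons h t ih =>
    obtain ⟨hph, hpL⟩ := hb h (by simp)
    have hgt : ∀ y ∈ t, h < y := (List.pairwise_cons.mp hs).1
    rw [PySem.List.pyRange_one_append pos h L hph (by omega),
        PySem.List.pyRange_one_append h (h + 1) L (by omega) (by
          rcases t.eq_nil_or_concat with rfl | ⟨_, y, rfl⟩
          · omega
          · have := (hb y (by simp)).2
            have := hgt y (by simp)
            omega),
        PySem.List.pyRange_one_singleton]
    simp only [List.map_append, pvEmit]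
    have h1 : (PySem.List.pyRange pos h 1).map (fun i => if i ∈ h :: t then 1 else 0)
        = List.replicate (h - pos).toNat (0 : Int) := by
      rw [← PySem.List.length_pyRange_one pos h, ← pvMap_zero_replicate]
      apply List.map_congr_left
      intro i hi
      rw [PySem.List.mem_pyRange_one] at hi
      have : i ∉ h :: t := by
        simp only [List.mem_cons, not_or]
        exact ⟨by omega, fun hm => by have := hgt i hm; omega⟩
      simp [this]
    have h2 : (PySem.List.pyRange (h + 1) L 1).map (fun i => if i ∈ h :: t then 1 else 0)
        = pvEmit t (h + 1) L := by
      rw [ih (h + 1) (List.pairwise_cons.mp hs).2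
            (fun y hy => ⟨by have := hgt y hy; omega, (hb y (by simp [hy])).2⟩)]
      apply List.map_congr_left
      intro i hi
      rw [PySem.List.mem_pyRange_one] at hi
      have : (i ∈ h :: t) ↔ (i ∈ t) := by
        simp only [List.mem_cons, or_iff_right_iff_imp]
        intro he; omega
      simp [this]
    rw [h1, h2]
    simp

-- B's run-length output equals A's membership map, for any length L
theorem pvAlt_eq_gather (xs : List Int) (L : Int) :
    pvEmit (PySem.List.sorted
        (PySem.Set.ofList (xs.filter (fun i => decide (0 ≤ i ∧ i < L)))) (fun x => x) false) 0 L
      = (PySem.List.pyRange 0 L 1).map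
          (fun i => if PySem.Set.contains (PySem.Set.ofList xs) i then 1 else 0) := by
  set F := xs.filter (fun i => decide (0 ≤ i ∧ i < L)) with hF
  set hits := PySem.List.sorted (PySem.Set.ofList F) (fun x => x) false with hhits
  have hmem : ∀ i : Int, i ∈ hits ↔ i ∈ xs ∧ 0 ≤ i ∧ i < L := by
    intro i
    rw [hhits, PySem.List.mem_sorted, PySem.Set.mem_ofList, hF, List.mem_filter]
    simp
  rw [pvEmit_eq_map hits 0 L (PySem.List.sorted_ofList_pairwise_lt F)
        (fun h hh => by have := (hmem h).mp hh; exact ⟨this.2.1, this.2.2⟩)]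
  apply List.map_congr_left
  intro i hi
  rw [PySem.List.mem_pyRange_one] at hi
  have hcd : PySem.Set.contains (PySem.Set.ofList xs) i = decide (i ∈ hits) := by
    simp only [PySem.Set.contains, List.contains_eq_mem, PySem.Set.mem_ofList]
    by_cases hx : i ∈ xs
    · simp [hx, (hmem i).mpr ⟨hx, by omega, by omega⟩]
    · have hnh : i ∉ hits := fun hh => hx ((hmem i).mp hh).1
      simp [hx, hnh]
  rw [hcd]
  simp

-- ===== VERDICT (by name: the statement is the Claim_ definition above) =====
theorem indices_to_indicator_spec : Claim_equal_indices_to_indicator := by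
  intro xs ol _ _
  unfold Spec_indices_to_indicator indices_to_indicator indices_to_indicator_alt
  cases ol with
  | none =>
    cases h : PySem.List.max? xs (fun x => x) with
    | none => simp
    | some m => simp only [Option.map_some]; exact (pvAlt_eq_gather xs (m + 1)).symm
  | some L => exact (pvAlt_eq_gather xs L).symm
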